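-- pv_equiv track=rewrite | github.com/mmalhotra/fast-autocomplete | fast_autocomplete/kg/StringUtil.py | generateMultiValuedVtvString
-- ===== SOURCE A (Python) =====
-- def generateMultiValuedVtvString(list_of_iterables, separator='<>', limit=None):
--     """
--     based on the length of the tuples generates a string which can be parsed by
--     parseMultiValuedVtvString and parseMultiValuedAttributedVtvString
--     for parseMultiValuedAttributedVtvString it should be 2
--     >>> generateMultiValuedVtvString([("tom cruise", "wiki1"), ("kate", ), ("Spielberg", "wiki3", "director")])
--     'tom cruise{wiki1}<>kate<>Spielberg{wiki3}{director}'
--     Given a list of tuples say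
--     [ ( "a",  ), ( "a", None, None ), ( "a", "b", None ),
--       ( "a", "b", "c" ), ( "a", None, "c"), ( "a", "b", "c", "d", "e")
--     ]
--     a<>a<>a{b}<>a{b}{c}<>a{}{c}<>a{b}{c}{d}{e}
--     if a limit is given - it limits then entries in curly braces
--     i.e. from tuple[1: limit + 1]
--     for limit = 2 a{b}{c}{d}{e} will be a{b}{c}
--     for limi = 1 it will be a{b}
--     """
--
--     str_list = []
--     if limit is not None and isinstance(limit, int):
--         list_of_iterables = [ tup[: limit + 1 ] for tup in list_of_iterables ]
--
--     for tup in list_of_iterables: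
--         tup = list(tup)
--         title = tup[0]
--         curly_brace_contents = tup[1: ]
--         curly_brace_contents.reverse()
--
--         curly_brace_contents_list = []
--         has_data = False
--         for i in curly_brace_contents:
--             if not i:
--                 if not has_data:
--                     continue
--                 i = ''
--             has_data = True
--             curly_brace_contents_list.append("{%s}" % i)
--         curly_brace_contents_list.reverse()
--
--         str_list.append('%s%s' % (title, ''.join(curly_brace_contents_list)))
--
--     return separator.join(str_list)
-- ===== SOURCE B (Python) =====
-- def generateMultiValuedVtvString(list_of_iterables, separator='<>', limit=None):
--     if limit is not None and isinstance(limit, int):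
--         list_of_iterables = [tup[: limit + 1] for tup in list_of_iterables]
--
--     parts = []
--     for tup in list_of_iterables:
--         tup = list(tup)
--         title = tup[0]
--         rest = tup[1:]
--         j = -1
--         for idx, v in enumerate(rest):
--             if v:
--                 j = idx
--         braces = ''.join('{%s}' % v if v else '{}' for v in rest[: j + 1])
--         parts.append('%s%s' % (title, braces))
--     return separator.join(parts)
-- ===== Notes on version B (the rewrite author's own statement) =====
-- stated objective: simpler
-- what changed: Per tuple, B finds the rightmost truthy index in one forward enumerate pass and formats tup[1:j+1] in a single forward pass, replacing A's two list reversals and its skip-until-data accumulator loop.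
import Mathlib
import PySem

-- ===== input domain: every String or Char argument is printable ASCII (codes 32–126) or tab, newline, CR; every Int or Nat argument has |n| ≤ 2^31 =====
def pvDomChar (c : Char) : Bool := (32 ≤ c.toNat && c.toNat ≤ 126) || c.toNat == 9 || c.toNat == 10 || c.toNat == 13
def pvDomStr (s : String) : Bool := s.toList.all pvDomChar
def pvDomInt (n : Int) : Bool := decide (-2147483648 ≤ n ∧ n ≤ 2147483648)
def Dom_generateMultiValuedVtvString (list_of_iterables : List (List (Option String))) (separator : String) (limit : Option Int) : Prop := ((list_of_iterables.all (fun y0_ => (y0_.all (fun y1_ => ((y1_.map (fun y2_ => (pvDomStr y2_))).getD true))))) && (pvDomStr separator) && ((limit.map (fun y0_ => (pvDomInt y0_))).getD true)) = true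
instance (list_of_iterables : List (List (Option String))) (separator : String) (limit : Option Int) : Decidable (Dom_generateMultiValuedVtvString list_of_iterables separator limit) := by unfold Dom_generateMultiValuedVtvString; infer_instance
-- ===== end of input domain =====

-- B replaces A's double reverse + skip-until-data loop by one forward scan that finds the
-- rightmost truthy position and one forward formatting pass (objective: simpler decomposition).

-- Python truthiness of an Option String cell: None and '' are falsy
def pvTruthy (o : Option String) : Bool :=
  match o with
  | none => false
  | some s => !s.toList.isEmpty

-- '%s' % o  (title position: None prints as "None")
def pvFmt (o : Option String) : String :=
  match o with
  | none => "None"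
  | some s => s

-- ===== PORT A =====
-- A's loop body: skip falsy until data found (scanning the reversed contents), else append a brace
def pvAStep (st : List String × Bool) (i : Option String) : List String × Bool :=
  if !(pvTruthy i) then
    if !st.2 then st
    else (st.1 ++ ["{}"], true)
  else (st.1 ++ ["{" ++ i.getD "" ++ "}"], true)

-- one tuple; Python's tup[0] raises IndexError on an empty tuple (excluded by Pre_), headD is a dummy there
def pvARow (tup : List (Option String)) : String :=
  let title := tup.headD none
  let contents := (tup.drop 1).reverse
  let r := contents.foldl pvAStep ([], false)
  pvFmt title ++ PySem.Str.join "" r.1.reverse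

def generateMultiValuedVtvString (list_of_iterables : List (List (Option String))) (separator : String) (limit : Option Int) : String :=
  let l := match limit with
    | some k => list_of_iterables.map (fun tup => PySem.List.slice tup none (some (k + 1)))
    | none => list_of_iterables
  PySem.Str.join separator (l.map pvARow)

-- ===== PORT B =====
-- Source B: '{%s}' % v if v else '{}'
def pvBrace (v : Option String) : String :=
  if pvTruthy v then "{" ++ v.getD "" ++ "}" else "{}"

-- Source B's enumerate loop: state (idx, j), j = last truthy index so far (-1 if none)
def pvBStep (st : Int × Int) (v : Option String) : Int × Int :=
  (st.1 + 1, if pvTruthy v then st.1 else st.2)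

def pvBRow (tup : List (Option String)) : String :=
  let title := tup.headD none
  let rest := tup.drop 1
  let j := (rest.foldl pvBStep (0, -1)).2
  let braces := PySem.Str.join "" ((PySem.List.slice rest none (some (j + 1))).map pvBrace)
  pvFmt title ++ braces

def generateMultiValuedVtvString_alt (list_of_iterables : List (List (Option String))) (separator : String) (limit : Option Int) : String :=
  let l := match limit with
    | some k => list_of_iterables.map (fun tup => PySem.List.slice tup none (some (k + 1)))
    | none => list_of_iterables
  PySem.Str.join separator (l.map pvBRow)

-- ===== PRECONDITION & SPEC =====
-- Pre_ excludes exactly the inputs where Python A raises IndexError: a tuple that is empty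
-- after the limit slicing (tup[0] out of range).
def Pre_generateMultiValuedVtvString (list_of_iterables : List (List (Option String))) (separator : String) (limit : Option Int) : Prop :=
  ∀ tup ∈ list_of_iterables,
    tup ≠ [] ∧ ∀ k ∈ limit, 0 ≤ k ∨ (k < -1 ∧ -k ≤ (tup.length : Int))

instance (list_of_iterables : List (List (Option String))) (separator : String) (limit : Option Int) : Decidable (Pre_generateMultiValuedVtvString list_of_iterables separator limit) := by unfold Pre_generateMultiValuedVtvString; infer_instance

def pvWitness_generateMultiValuedVtvString : List (List (Option String)) × String × Option Int :=
  ([[some "a", some "b", none, some "c"], [some "kate"]], "<>", some 2)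

def Spec_generateMultiValuedVtvString (list_of_iterables : List (List (Option String))) (separator : String) (limit : Option Int) (out : String) : Prop := out = generateMultiValuedVtvString_alt list_of_iterables separator limit
instance (list_of_iterables : List (List (Option String))) (separator : String) (limit : Option Int) (out : String) : Decidable (Spec_generateMultiValuedVtvString list_of_iterables separator limit out) := by unfold Spec_generateMultiValuedVtvString; infer_instance

-- ===== CLAIM (what is proved, stated in full; the proofs are below) =====
def Claim_equal_generateMultiValuedVtvString : Prop := ∀ (list_of_iterables : List (List (Option String))) (separator : String) (limit : Option Int), Dom_generateMultiValuedVtvString list_of_iterables separator limit → Pre_generateMultiValuedVtvString list_of_iterables separator limit → Spec_generateMultiValuedVtvString list_of_iterables separator limit (generateMultiValuedVtvString list_of_iterables separator limit)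

-- ===== LEMMAS AND PROOFS =====

-- once has_data is set, A's loop appends one brace per element
theorem pvAStep_run_true (xs : List (Option String)) (acc : List String) :
    xs.foldl pvAStep (acc, true) = (acc ++ xs.map pvBrace, true) := by
  induction xs generalizing acc with
  | nil => simp
  | cons a t ih =>
    simp only [List.foldl_cons, List.map_cons, pvAStep, pvBrace]
    cases h : pvTruthy a <;> simp [ih]

-- Source B's index loop: final idx, and bounds on j
theorem pvBStep_run (xs : List (Option String)) (i j : Int) (h0 : 0 ≤ i) (h1 : -1 ≤ j) (h2 : j < i) :
    (xs.foldl pvBStep (i, j)).1 = i + xs.length ∧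
    -1 ≤ (xs.foldl pvBStep (i, j)).2 ∧ (xs.foldl pvBStep (i, j)).2 < i + xs.length := by
  induction xs generalizing i j with
  | nil => exact ⟨by simp, h1, by simpa using h2⟩
  | cons a t ih =>
    simp only [List.foldl_cons, pvBStep, List.length_cons]
    obtain ⟨f, l1, l2⟩ := ih (i + 1) (if pvTruthy a then i else j) (by omega)
      (by split <;> omega) (by split <;> omega)
    refine ⟨?_, l1, ?_⟩ <;> rw [f] at * <;> push_cast at * <;> omega

-- core: A's reversed skip-loop output equals B's take-to-last-truthy formatting pass
theorem pvCore (rest : List (Option String)) :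
    ((rest.reverse.foldl pvAStep ([], false)).1).reverse
      = (PySem.List.slice rest none (some ((rest.foldl pvBStep (0, -1)).2 + 1))).map pvBrace := by
  induction rest using List.reverseRecOn with
  | nil => simp [PySem.List.slice]
  | append_singleton l a ih =>
    obtain ⟨f, b1, b2⟩ := pvBStep_run l 0 (-1) (by omega) (by omega) (by omega)
    have hj : (0:Int) ≤ (l.foldl pvBStep (0, -1)).2 + 1 := by omega
    have hfold : (l ++ [a]).foldl pvBStep (0, -1) = pvBStep (l.foldl pvBStep (0, -1)) a := by
      simp [List.foldl_append]
    rw [hfold]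
    have hrev : (l ++ [a]).reverse = a :: l.reverse := by simp
    rw [hrev, List.foldl_cons]
    cases h : pvTruthy a with
    | false =>
      have hstep : pvAStep ([], false) a = ([], false) := by simp [pvAStep, h]
      have hstepB : (pvBStep (l.foldl pvBStep (0, -1)) a).2 = (l.foldl pvBStep (0, -1)).2 := by
        simp [pvBStep, h]
      rw [hstep, hstepB, ih]
      rw [PySem.List.slice_to (hb := hj), PySem.List.slice_to (hb := hj)]
      rw [List.take_append_of_le_length (by omega)]
    | true =>
      have hstep : pvAStep ([], false) a = ([pvBrace a], true) := by
        simp [pvAStep, pvBrace, h]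
      have hstepB : (pvBStep (l.foldl pvBStep (0, -1)) a).2 = (l.length : Int) := by
        simp [pvBStep, h, f]
      rw [hstep, hstepB, pvAStep_run_true]
      rw [PySem.List.slice_to (hb := by omega)]
      have : ((l.length : Int) + 1).toNat = l.length + 1 := by omega
      rw [this, List.take_of_length_le (by simp)]
      simp

-- per-row equivalence
theorem pvRow_eq (tup : List (Option String)) : pvARow tup = pvBRow tup := by
  simp only [pvARow, pvBRow, pvCore]

-- ===== VERDICT (by name: the statement is the Claim_ definition above) =====
theorem generateMultiValuedVtvString_spec : Claim_equal_generateMultiValuedVtvString := by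
  intro l sep lim _ _
  unfold Spec_generateMultiValuedVtvString generateMultiValuedVtvString generateMultiValuedVtvString_alt
  have h : ∀ (xs : List (List (Option String))), xs.map pvARow = xs.map pvBRow :=
    fun xs => List.map_congr_left (fun x _ => pvRow_eq x)
  cases lim with
  | none => exact congrArg (PySem.Str.join sep) (h l)
  | some k => exact congrArg (PySem.Str.join sep) (h (l.map _))
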